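-- pv_equiv track=rewrite | github.com/kabishou11/OrcaFish | backend/api/routes/simulation.py | _map_remote_type
-- ===== SOURCE A (Python) =====
-- from typing import Any, Dict, List, Optional, Set, Tuple
--
-- def _map_remote_type(labels: List[str], fallback: str = "Entity") -> str:
--     normalized = [str(label) for label in labels if str(label).strip()]
--     if "Episode" in normalized:
--         return "Episode"
--     if any(label in {"Actor", "Region", "Concept", "Platform", "Agent", "Action", "Goal", "Event", "Episode"} for label in normalized):
--         for candidate in ("Episode", "Event", "Goal", "Actor", "Region", "Concept", "Platform", "Agent", "Action"):
--             if candidate in normalized: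
--                 return candidate
--     return fallback
-- ===== SOURCE B (Python) =====
-- _PRIORITY = ("Episode", "Event", "Goal", "Actor", "Region", "Concept", "Platform", "Agent", "Action")
-- _RANK = {name: i for i, name in enumerate(_PRIORITY)}
--
-- def _map_remote_type(labels, fallback="Entity"):
--     best = None  # (rank, name) with the smallest rank seen so far
--     for label in labels:
--         s = str(label)
--         if not s.strip():
--             continue
--         r = _RANK.get(s)
--         if r is not None and (best is None or r < best[0]):
--             best = (r, s)
--     return best[1] if best is not None else fallback
-- ===== Notes on version B (the rewrite author's own statement) =====
-- stated objective: alternative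
-- what changed: Instead of building a normalized list and scanning it up to nine times (membership test, any(), and a loop over the priority tuple), B builds a name-to-rank dict once and makes a single pass over the labels keeping the (rank, name) pair with the smallest rank, returning it (or fallback if none matched).
import Mathlib
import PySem

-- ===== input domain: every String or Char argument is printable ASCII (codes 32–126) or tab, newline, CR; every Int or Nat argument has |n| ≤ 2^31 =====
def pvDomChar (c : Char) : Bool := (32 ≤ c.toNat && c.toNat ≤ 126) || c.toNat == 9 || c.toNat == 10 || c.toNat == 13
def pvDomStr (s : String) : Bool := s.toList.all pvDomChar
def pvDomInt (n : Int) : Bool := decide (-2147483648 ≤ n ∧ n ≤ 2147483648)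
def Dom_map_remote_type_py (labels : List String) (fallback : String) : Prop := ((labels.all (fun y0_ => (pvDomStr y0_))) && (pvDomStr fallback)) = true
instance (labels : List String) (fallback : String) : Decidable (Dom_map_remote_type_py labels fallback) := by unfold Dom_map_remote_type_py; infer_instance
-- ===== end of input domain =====

-- B replaces A's repeated membership scans over the priority tuple by a single pass over the
-- labels keeping the best (minimal) rank from a rank table; objective: alternative (same O(n) cost).

-- ===== PORT A =====
-- the candidate priority tuple of A's inner loop
def pvCands : List String :=
  ["Episode", "Event", "Goal", "Actor", "Region", "Concept", "Platform", "Agent", "Action"]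

-- the set literal of A's any(...) test
def pvSet9 : PySem.Set String :=
  PySem.Set.ofList ["Actor", "Region", "Concept", "Platform", "Agent", "Action", "Goal", "Event", "Episode"]

-- 'for candidate in (...): if candidate in normalized: return candidate' falling through to 'return fallback'
def pvLoopA : List String → List String → String → String
  | [], _, fb => fb
  | c :: cs, n, fb => if n.contains c then c else pvLoopA cs n fb

def map_remote_type_py (labels : List String) (fallback : String) : String :=
  let normalized := labels.filter (fun l => !(PySem.Str.strip l == ""))
  if normalized.contains "Episode" then "Episode"
  else if normalized.any (fun l => pvSet9.contains l) then pvLoopA pvCands normalized fallback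
  else fallback

-- ===== PORT B =====
-- _PRIORITY
def pvPrioB : List String :=
  ["Episode", "Event", "Goal", "Actor", "Region", "Concept", "Platform", "Agent", "Action"]

-- _RANK = {name: i for i, name in enumerate(_PRIORITY)}
def pvRankD : PySem.Dict String Int :=
  PySem.Dict.ofList ((PySem.List.enumerate pvPrioB).map (fun p => (p.2, p.1)))

-- one loop-body step of B: skip blank labels, look the label up in the rank table, keep the strictly better rank
def pvStepB (best : Option (Int × String)) (s : String) : Option (Int × String) :=
  if PySem.Str.strip s == "" then best
  else
    match pvRankD.get? s with
    | none => best
    | some r =>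
      match best with
      | none => some (r, s)
      | some b => if r < b.1 then some (r, s) else best

def map_remote_type_py_alt (labels : List String) (fallback : String) : String :=
  match labels.foldl pvStepB none with
  | some b => b.2
  | none => fallback

-- ===== PRECONDITION & SPEC =====
def Spec_map_remote_type_py (labels : List String) (fallback : String) (out : String) : Prop := out = map_remote_type_py_alt labels fallback
instance (labels : List String) (fallback : String) (out : String) : Decidable (Spec_map_remote_type_py labels fallback out) := by unfold Spec_map_remote_type_py; infer_instance

-- ===== CLAIM (what is proved, stated in full; the proofs are below) =====
def Claim_equal_map_remote_type_py : Prop := ∀ (labels : List String) (fallback : String), Dom_map_remote_type_py labels fallback → Spec_map_remote_type_py labels fallback (map_remote_type_py labels fallback)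

-- ===== LEMMAS AND PROOFS =====

-- the best (rank, name) pair present among the labels, written as an if-chain
def pvChain (ls : List String) : Option (Int × String) :=
  if ls.contains "Episode" then some (0, "Episode")
  else if ls.contains "Event" then some (1, "Event")
  else if ls.contains "Goal" then some (2, "Goal")
  else if ls.contains "Actor" then some (3, "Actor")
  else if ls.contains "Region" then some (4, "Region")
  else if ls.contains "Concept" then some (5, "Concept")
  else if ls.contains "Platform" then some (6, "Platform")
  else if ls.contains "Agent" then some (7, "Agent")
  else if ls.contains "Action" then some (8, "Action")
  else none

-- left-biased minimum merge of two optional (rank, name) pairs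
def pvSel (acc new : Option (Int × String)) : Option (Int × String) :=
  match new with
  | none => acc
  | some n =>
    match acc with
    | none => some n
    | some b => if n.1 < b.1 then some n else acc

theorem pvSel_none_left (x : Option (Int × String)) : pvSel none x = x := by
  cases x <;> rfl

theorem pvSel_assoc (a b c : Option (Int × String)) :
    pvSel (pvSel a b) c = pvSel a (pvSel b c) := by
  rcases c with _ | ⟨rc, sc⟩
  · rfl
  rcases b with _ | ⟨rb, sb⟩
  · rfl
  rcases a with _ | ⟨ra, sa⟩
  · by_cases h : rc < rb <;> simp [pvSel, h]
  · by_cases h1 : rc < rb <;> by_cases h2 : rb < ra <;> simp [pvSel, h1, h2] <;>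
      first | rfl | omega

theorem pvStepB_sel (acc : Option (Int × String)) (s : String) :
    pvStepB acc s = pvSel acc (pvStepB none s) := by
  unfold pvStepB
  split
  · cases acc <;> rfl
  · cases h : pvRankD.get? s <;> cases acc <;> simp [pvSel]

theorem pvFoldl_sel (ls : List String) (acc : Option (Int × String)) :
    ls.foldl pvStepB acc = pvSel acc (ls.foldl pvStepB none) := by
  induction ls generalizing acc with
  | nil => rfl
  | cons l ls ih =>
    rw [List.foldl_cons, List.foldl_cons, ih (pvStepB acc l), ih (pvStepB none l),
      pvStepB_sel acc l, pvSel_assoc]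

theorem pvRank_cases (s : String) :
    pvRankD.get? s =
      if "Episode" = s then some 0 else if "Event" = s then some 1
      else if "Goal" = s then some 2 else if "Actor" = s then some 3
      else if "Region" = s then some 4 else if "Concept" = s then some 5
      else if "Platform" = s then some 6 else if "Agent" = s then some 7
      else if "Action" = s then some 8 else none := by
  have h : pvRankD = PySem.Dict.mk [("Episode", 0), ("Event", 1), ("Goal", 2), ("Actor", 3),
      ("Region", 4), ("Concept", 5), ("Platform", 6), ("Agent", 7), ("Action", 8)] := by rfl
  rw [h]
  simp only [PySem.Dict.get?_mk_cons, beq_iff_eq]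
  rfl

theorem pvStep_map (l : String) :
    pvStepB none l = (pvRankD.get? l).map (fun r => (r, l)) := by
  unfold pvStepB
  by_cases hs : (PySem.Str.strip l == "") = true
  · rw [if_pos hs, pvRank_cases]
    split_ifs <;> first | rfl | (subst_vars; exact absurd hs (by decide))
  · rw [if_neg hs]
    cases pvRankD.get? l <;> simp

theorem pvChain_cons_ne (ls : List String) (l : String)
    (h0 : "Episode" ≠ l) (h1 : "Event" ≠ l) (h2 : "Goal" ≠ l) (h3 : "Actor" ≠ l)
    (h4 : "Region" ≠ l) (h5 : "Concept" ≠ l) (h6 : "Platform" ≠ l) (h7 : "Agent" ≠ l)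
    (h8 : "Action" ≠ l) : pvChain (l :: ls) = pvChain ls := by
  simp [pvChain, h0, h1, h2, h3, h4, h5, h6, h7, h8]

theorem pvSelChainEp (ls : List String) :
    pvSel (some ((0 : Int), "Episode")) (pvChain ls) = pvChain ("Episode" :: ls) := by
  simp only [pvChain, List.contains_cons]
  simp
  split_ifs <;> simp [pvSel]

theorem pvSelChainEv (ls : List String) :
    pvSel (some ((1 : Int), "Event")) (pvChain ls) = pvChain ("Event" :: ls) := by
  simp only [pvChain, List.contains_cons]
  simp
  split_ifs <;> simp [pvSel]

theorem pvSelChainGo (ls : List String) :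
    pvSel (some ((2 : Int), "Goal")) (pvChain ls) = pvChain ("Goal" :: ls) := by
  simp only [pvChain, List.contains_cons]
  simp
  split_ifs <;> simp [pvSel]

theorem pvSelChainAc (ls : List String) :
    pvSel (some ((3 : Int), "Actor")) (pvChain ls) = pvChain ("Actor" :: ls) := by
  simp only [pvChain, List.contains_cons]
  simp
  split_ifs <;> simp [pvSel]

theorem pvSelChainRe (ls : List String) :
    pvSel (some ((4 : Int), "Region")) (pvChain ls) = pvChain ("Region" :: ls) := by
  simp only [pvChain, List.contains_cons]
  simp
  split_ifs <;> simp [pvSel]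

theorem pvSelChainCo (ls : List String) :
    pvSel (some ((5 : Int), "Concept")) (pvChain ls) = pvChain ("Concept" :: ls) := by
  simp only [pvChain, List.contains_cons]
  simp
  split_ifs <;> simp [pvSel]

theorem pvSelChainPl (ls : List String) :
    pvSel (some ((6 : Int), "Platform")) (pvChain ls) = pvChain ("Platform" :: ls) := by
  simp only [pvChain, List.contains_cons]
  simp
  split_ifs <;> simp [pvSel]

theorem pvSelChainAg (ls : List String) :
    pvSel (some ((7 : Int), "Agent")) (pvChain ls) = pvChain ("Agent" :: ls) := by
  simp only [pvChain, List.contains_cons]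
  simp
  split_ifs <;> simp [pvSel]

theorem pvSelChainAn (ls : List String) :
    pvSel (some ((8 : Int), "Action")) (pvChain ls) = pvChain ("Action" :: ls) := by
  simp only [pvChain, List.contains_cons]
  simp
  split_ifs <;> simp [pvSel]

theorem pvBcore (ls : List String) : ls.foldl pvStepB none = pvChain ls := by
  induction ls with
  | nil => rfl
  | cons l ls ih =>
    rw [List.foldl_cons, pvFoldl_sel, ih, pvStep_map, pvRank_cases]
    by_cases h0 : "Episode" = l
    · subst h0; simp; exact pvSelChainEp ls
    rw [if_neg h0]
    by_cases h1 : "Event" = l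
    · subst h1; simp; exact pvSelChainEv ls
    rw [if_neg h1]
    by_cases h2 : "Goal" = l
    · subst h2; simp; exact pvSelChainGo ls
    rw [if_neg h2]
    by_cases h3 : "Actor" = l
    · subst h3; simp; exact pvSelChainAc ls
    rw [if_neg h3]
    by_cases h4 : "Region" = l
    · subst h4; simp; exact pvSelChainRe ls
    rw [if_neg h4]
    by_cases h5 : "Concept" = l
    · subst h5; simp; exact pvSelChainCo ls
    rw [if_neg h5]
    by_cases h6 : "Platform" = l
    · subst h6; simp; exact pvSelChainPl ls
    rw [if_neg h6]
    by_cases h7 : "Agent" = l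
    · subst h7; simp; exact pvSelChainAg ls
    rw [if_neg h7]
    by_cases h8 : "Action" = l
    · subst h8; simp; exact pvSelChainAn ls
    rw [if_neg h8]
    simp only [Option.map_none]
    rw [pvSel_none_left]
    exact (pvChain_cons_ne ls l h0 h1 h2 h3 h4 h5 h6 h7 h8).symm

theorem pvAny_set9 (ls : List String) :
    ((ls.filter (fun l => !(PySem.Str.strip l == ""))).any (fun l => pvSet9.contains l) = true) ↔
      (ls.contains "Episode" = true ∨ ls.contains "Event" = true ∨ ls.contains "Goal" = true ∨
       ls.contains "Actor" = true ∨ ls.contains "Region" = true ∨ ls.contains "Concept" = true ∨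
       ls.contains "Platform" = true ∨ ls.contains "Agent" = true ∨ ls.contains "Action" = true) := by
  constructor
  · intro h
    rw [List.any_eq_true] at h
    obtain ⟨x, hx, hc⟩ := h
    rw [List.mem_filter] at hx
    have hx9 : x = "Actor" ∨ x = "Region" ∨ x = "Concept" ∨ x = "Platform" ∨ x = "Agent" ∨
        x = "Action" ∨ x = "Goal" ∨ x = "Event" ∨ x = "Episode" := by
      have := (PySem.Set.contains_iff pvSet9 x).mp hc
      simpa [pvSet9, PySem.Set.ofList] using this
    rcases hx9 with rfl|rfl|rfl|rfl|rfl|rfl|rfl|rfl|rfl <;> simp_all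
  · rintro (h|h|h|h|h|h|h|h|h) <;>
    · rw [List.any_eq_true]
      rw [List.contains_iff_mem] at h
      exact ⟨_, List.mem_filter.mpr ⟨h, by decide⟩, by decide⟩

theorem pvContains_filter (p : String → Bool) (c : String) (hc : p c = true) (ls : List String) :
    (ls.filter p).contains c = ls.contains c := by
  rw [Bool.eq_iff_iff]
  simp [List.mem_filter, hc]

set_option maxHeartbeats 1000000 in
theorem pvAcore (ls : List String) (fb : String) :
    map_remote_type_py ls fb = (match pvChain ls with | some b => b.2 | none => fb) := by
  unfold map_remote_type_py pvChain
  simp only [pvCands, pvLoopA]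
  rw [pvContains_filter _ "Episode" (by decide) ls, pvContains_filter _ "Event" (by decide) ls,
    pvContains_filter _ "Goal" (by decide) ls, pvContains_filter _ "Actor" (by decide) ls,
    pvContains_filter _ "Region" (by decide) ls, pvContains_filter _ "Concept" (by decide) ls,
    pvContains_filter _ "Platform" (by decide) ls, pvContains_filter _ "Agent" (by decide) ls,
    pvContains_filter _ "Action" (by decide) ls]
  simp only [pvAny_set9]
  split_ifs <;> simp_all

-- ===== VERDICT (by name: the statement is the Claim_ definition above) =====
theorem map_remote_type_py_spec : Claim_equal_map_remote_type_py := by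
  intro labels fallback _
  unfold Spec_map_remote_type_py map_remote_type_py_alt
  rw [pvBcore, pvAcore]
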